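-- pv_equiv track=rewrite | github.com/fberfber/OCC_Laser | OOK/receiverMain.py | calibrate_pulsewidth
-- ===== SOURCE A (Python) =====
-- from itertools import groupby
--
-- def calibrate_pulsewidth(processed_frame):
--     """
--     Calibrates the pulsewidth of 0 and 1 sequencies
--     for a given frame. Used to calibrate the sampling process.
--     """
--     durations = []
--     starts = []
--     i = 0
--     for key,group in groupby(processed_frame):
--         length=sum(1 for _ in group)
--
--         if key==0 :
--             durations.append(length)
--             starts.append(i)
--         i += length
--     return starts, durations
-- ===== SOURCE B (Python) =====
-- def calibrate_pulsewidth(processed_frame):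
--     """
--     Calibrates the pulsewidth of 0 and 1 sequencies
--     for a given frame. Used to calibrate the sampling process.
--     """
--     starts = []
--     durations = []
--     run_start = -1
--     i = 0
--     for x in processed_frame:
--         if x == 0:
--             if run_start < 0:
--                 run_start = i
--         else:
--             if run_start >= 0:
--                 starts.append(run_start)
--                 durations.append(i - run_start)
--                 run_start = -1
--         i += 1
--     if run_start >= 0:
--         starts.append(run_start)
--         durations.append(i - run_start)
--     return starts, durations
-- ===== Notes on version B (the rewrite author's own statement) =====
-- stated objective: faster
-- what changed: Replaces itertools.groupby over all runs (counting each group's length with an inner generator sum) by a single index-based state-machine pass that only tracks the start of the current zero-run and emits (start, i-start) at each zero-to-nonzero transition and at end of frame.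
import Mathlib
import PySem

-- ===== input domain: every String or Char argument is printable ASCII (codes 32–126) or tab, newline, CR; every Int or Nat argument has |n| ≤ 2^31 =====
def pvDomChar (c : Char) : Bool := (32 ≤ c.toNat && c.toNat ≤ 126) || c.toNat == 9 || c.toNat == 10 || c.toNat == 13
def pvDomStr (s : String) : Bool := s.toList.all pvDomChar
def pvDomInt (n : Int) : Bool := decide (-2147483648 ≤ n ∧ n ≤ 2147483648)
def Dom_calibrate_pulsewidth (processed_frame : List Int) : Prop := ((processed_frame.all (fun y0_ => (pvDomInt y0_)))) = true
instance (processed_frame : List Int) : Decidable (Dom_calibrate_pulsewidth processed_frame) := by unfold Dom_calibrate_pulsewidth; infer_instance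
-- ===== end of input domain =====

-- B replaces the groupby-over-runs loop by a single index-based state-machine pass
-- tracking only the start of the current zero-run (objective: faster by a constant factor).

-- ===== PORT A =====
-- itertools.groupby on a list of Ints: the successive (key, group length) pairs
def pyGroupby (l : List Int) : List (Int × Int) :=
  match l with
  | [] => []
  | x :: xs =>
    (x, 1 + ((xs.takeWhile (fun y => y == x)).length : Int)) ::
      pyGroupby (xs.dropWhile (fun y => y == x))
termination_by l.length
decreasing_by
  simp only [List.length_cons]
  exact Nat.lt_succ_of_le (List.length_dropWhile_le _ _)

-- loop body of A: state (starts, durations, i); group = (key, length)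
def stepA : (List Int × List Int × Int) → (Int × Int) → (List Int × List Int × Int)
  | (starts, durations, i), (key, length) =>
    if key == 0 then (starts ++ [i], durations ++ [length], i + length)
    else (starts, durations, i + length)

def calibrate_pulsewidth (processed_frame : List Int) : List Int × List Int :=
  let r := (pyGroupby processed_frame).foldl stepA ([], [], 0)
  (r.1, r.2.1)

-- ===== PORT B =====
-- loop body of B: state (starts, durations, run_start, i)
def stepB : (List Int × List Int × Int × Int) → Int → (List Int × List Int × Int × Int)
  | (starts, durations, run_start, i), x =>
    if x == 0 then
      if run_start < 0 then (starts, durations, i, i + 1)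
      else (starts, durations, run_start, i + 1)
    else
      if run_start ≥ 0 then (starts ++ [run_start], durations ++ [i - run_start], -1, i + 1)
      else (starts, durations, run_start, i + 1)

def calibrate_pulsewidth_alt (processed_frame : List Int) : List Int × List Int :=
  let r := processed_frame.foldl stepB ([], [], -1, 0)
  if r.2.2.1 ≥ 0 then (r.1 ++ [r.2.2.1], r.2.1 ++ [r.2.2.2 - r.2.2.1])
  else (r.1, r.2.1)

-- ===== PRECONDITION & SPEC =====
def Spec_calibrate_pulsewidth (processed_frame : List Int) (out : List Int × List Int) : Prop := out = calibrate_pulsewidth_alt processed_frame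
instance (processed_frame : List Int) (out : List Int × List Int) : Decidable (Spec_calibrate_pulsewidth processed_frame out) := by unfold Spec_calibrate_pulsewidth; infer_instance

-- ===== CLAIM (what is proved, stated in full; the proofs are below) =====
def Claim_equal_calibrate_pulsewidth : Prop := ∀ (processed_frame : List Int), Dom_calibrate_pulsewidth processed_frame → Spec_calibrate_pulsewidth processed_frame (calibrate_pulsewidth processed_frame)

-- ===== LEMMAS AND PROOFS =====

-- reference value: the (starts, durations) of the zero-runs of l with indices offset by i
def runsZ (l : List Int) (i : Int) : List Int × List Int :=
  match l with
  | [] => ([], [])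
  | x :: xs =>
    let len : Int := 1 + ((xs.takeWhile (fun y => y == x)).length : Int)
    let rest := runsZ (xs.dropWhile (fun y => y == x)) (i + len)
    if x == 0 then (i :: rest.1, len :: rest.2) else rest
termination_by l.length
decreasing_by
  simp only [List.length_cons]
  exact Nat.lt_succ_of_le (List.length_dropWhile_le _ _)

-- the end-of-loop flush of B
def flushB (st : List Int × List Int × Int × Int) : List Int × List Int :=
  if st.2.2.1 ≥ 0 then (st.1 ++ [st.2.2.1], st.2.1 ++ [st.2.2.2 - st.2.2.1])
  else (st.1, st.2.1)

lemma foldA_shift (g : List (Int × Int)) : ∀ s d i,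
    g.foldl stepA (s, d, i) =
      (s ++ (g.foldl stepA ([], [], i)).1,
       d ++ (g.foldl stepA ([], [], i)).2.1,
       (g.foldl stepA ([], [], i)).2.2) := by
  induction g with
  | nil => intro s d i; simp
  | cons kg g ih =>
    intro s d i
    obtain ⟨k, len⟩ := kg
    by_cases h : k == 0 <;>
      simp [stepA, h, ih (s ++ [i]) (d ++ [len]) (i + len), ih [i] [len] (i + len),
        ih s d (i + len)]

lemma foldB_shift (l : List Int) : ∀ s d rs i,
    l.foldl stepB (s, d, rs, i) =
      (s ++ (l.foldl stepB ([], [], rs, i)).1,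
       d ++ (l.foldl stepB ([], [], rs, i)).2.1,
       (l.foldl stepB ([], [], rs, i)).2.2) := by
  induction l with
  | nil => intro s d rs i; simp
  | cons x l ih =>
    intro s d rs i
    by_cases h : x == 0
    · by_cases h2 : rs < 0 <;>
        simp [stepB, h, h2, ih s d i (i + 1), ih s d rs (i + 1)]
    · by_cases h2 : rs ≥ 0 <;>
        simp [stepB, h, h2, ih (s ++ [rs]) (d ++ [i - rs]) (-1) (i + 1),
          ih [rs] [i - rs] (-1) (i + 1), ih s d rs (i + 1)]

lemma flushB_shift (s d : List Int) (st : List Int × List Int × Int × Int) :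
    flushB (s ++ st.1, d ++ st.2.1, st.2.2) =
      (s ++ (flushB st).1, d ++ (flushB st).2) := by
  obtain ⟨s1, d1, rs, i⟩ := st
  by_cases h : rs ≥ 0 <;> simp [flushB, h]

lemma foldB_zeros (t : List Int) (x : Int) (h : ∀ y ∈ t, (y == x) = true) (hx : x = 0) :
    ∀ rs i : Int, 0 ≤ rs → t.foldl stepB ([], [], rs, i) = ([], [], rs, i + (t.length : Int)) := by
  induction t with
  | nil => intro rs i _; simp
  | cons y t ih =>
    intro rs i hrs
    have hy : y = 0 := by have := h y (by simp); simpa [hx] using this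
    have ht : ∀ z ∈ t, (z == x) = true := fun z hz => h z (by simp [hz])
    have hlt : ¬ rs < 0 := by omega
    simp only [List.foldl_cons, stepB, hy, beq_self_eq_true, if_pos, hlt, ite_false]
    rw [ih ht rs (i + 1) hrs]
    simp only [Prod.mk.injEq, List.length_cons, true_and]
    push_cast; ring

lemma foldB_nonzeros (t : List Int) (x : Int) (h : ∀ y ∈ t, (y == x) = true) (hx : ¬ (x == 0) = true) :
    ∀ i : Int, t.foldl stepB ([], [], -1, i) = ([], [], -1, i + (t.length : Int)) := by
  induction t with
  | nil => intro i; simp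
  | cons y t ih =>
    intro i
    have hy : (y == 0) = false := by
      have hyx : y = x := by simpa using h y (by simp)
      subst hyx; simpa using hx
    have ht : ∀ z ∈ t, (z == x) = true := fun z hz => h z (by simp [hz])
    simp only [List.foldl_cons, stepB, hy]
    norm_num
    rw [ih ht (i + 1)]
    simp only [Prod.mk.injEq, List.length_cons, true_and]
    push_cast; ring

lemma len_split (x : Int) (xs : List Int) :
    ((xs.takeWhile (fun y => y == x)).length : Int) + ((xs.dropWhile (fun y => y == x)).length : Int) = (xs.length : Int) := by
  have := congrArg List.length (List.takeWhile_append_dropWhile (p := fun y => y == x) (l := xs))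
  simp only [List.length_append] at this
  push_cast [← this]; ring

lemma foldA_runs : ∀ n (l : List Int), l.length ≤ n → ∀ i,
    (pyGroupby l).foldl stepA ([], [], i) =
      ((runsZ l i).1, (runsZ l i).2, i + (l.length : Int)) := by
  intro n
  induction n with
  | zero =>
    intro l hl i
    have : l = [] := List.length_eq_zero_iff.mp (Nat.le_zero.mp hl)
    subst this; simp [pyGroupby, runsZ]
  | succ n ih =>
    intro l hl i
    match l with
    | [] => simp [pyGroupby, runsZ]
    | x :: xs =>
      have hr : (xs.dropWhile (fun y => y == x)).length ≤ n := by
        have := List.length_dropWhile_le (p := fun y => y == x) (l := xs)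
        simp only [List.length_cons] at hl; omega
      have hlen := len_split x xs
      set t := xs.takeWhile (fun y => y == x) with ht
      set r := xs.dropWhile (fun y => y == x) with hrw
      have hlist : ((x :: xs).length : Int) = 1 + (t.length : Int) + (r.length : Int) := by
        simp only [List.length_cons]; push_cast; omega
      rw [pyGroupby]
      simp only [List.foldl_cons]
      by_cases h : x == 0
      · rw [show stepA ([], [], i) (x, 1 + (t.length : Int)) = ([i], [1 + (t.length : Int)], i + (1 + (t.length : Int))) by simp [stepA, h]]
        rw [foldA_shift, ih r hr (i + (1 + (t.length : Int)))]
        rw [runsZ]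
        simp only [← ht, ← hrw, h, if_pos]
        simp only [Prod.mk.injEq]
        refine ⟨by simp, by simp, ?_⟩
        rw [hlist]; ring
      · rw [show stepA ([], [], i) (x, 1 + (t.length : Int)) = ([], [], i + (1 + (t.length : Int))) by simp [stepA, h]]
        rw [ih r hr (i + (1 + (t.length : Int)))]
        rw [runsZ]
        simp only [← ht, ← hrw, h, Bool.false_eq_true, if_neg, not_false_iff, ite_false]
        simp only [Prod.mk.injEq, true_and]
        rw [hlist]; ring

lemma foldB_runs : ∀ n (l : List Int), l.length ≤ n → ∀ i : Int, 0 ≤ i →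
    flushB (l.foldl stepB ([], [], -1, i)) = runsZ l i := by
  intro n
  induction n with
  | zero =>
    intro l hl i _
    have : l = [] := List.length_eq_zero_iff.mp (Nat.le_zero.mp hl)
    subst this; simp [flushB, runsZ]
  | succ n ih =>
    intro l hl i hi
    match l with
    | [] => simp [flushB, runsZ]
    | x :: xs =>
      have hsplit := List.takeWhile_append_dropWhile (p := fun y => y == x) (l := xs)
      have htmem : ∀ y ∈ xs.takeWhile (fun z => z == x), (y == x) = true :=
        fun y hy => List.mem_takeWhile_imp (p := fun z => z == x) hy
      have hr : (xs.dropWhile (fun y => y == x)).length ≤ n := by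
        have := List.length_dropWhile_le (p := fun y => y == x) (l := xs)
        simp only [List.length_cons] at hl; omega
      set t := xs.takeWhile (fun y => y == x) with ht
      set r := xs.dropWhile (fun y => y == x) with hrw
      have hxs : xs = t ++ r := hsplit.symm
      rw [runsZ]
      simp only [← ht, ← hrw]
      rw [show (x :: xs).foldl stepB ([], [], -1, i) = r.foldl stepB (t.foldl stepB (stepB ([], [], -1, i) x) ) from by
        rw [List.foldl_cons]; conv_lhs => rw [hxs]
        rw [List.foldl_append]]
      by_cases h : x == 0
      · have hx0 : x = 0 := by simpa using h
        rw [show stepB ([], [], -1, i) x = ([], [], i, i + 1) by simp [stepB, h]]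
        rw [foldB_zeros t x htmem hx0 i (i + 1) hi]
        match hr2 : r with
        | [] =>
          simp only [List.foldl_nil]
          rw [flushB]
          simp only [ge_iff_le, hi, if_pos]
          rw [show runsZ [] (i + (1 + (t.length : Int))) = ([], []) from by simp [runsZ]]
          simp only [h, if_pos]
          simp only [Prod.mk.injEq]
          refine ⟨rfl, ?_⟩
          simp; push_cast; ring
        | y :: r' =>
          have h0 : 0 < (xs.dropWhile (fun z => z == x)).length := by
            rw [← hrw]; simp
          have hy : (y == 0) = false := by
            have hh := List.head?_dropWhile_not (fun z => z == x) xs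
            rw [← hrw] at hh
            subst hx0
            simpa using hh
          have hige : i + 1 + (t.length : Int) ≥ 0 := by
            have : (0:Int) ≤ (t.length : Int) := Int.natCast_nonneg _
            omega
          rw [List.foldl_cons]
          rw [show stepB ([], [], i, i + 1 + (t.length : Int)) y =
              ([i], [i + 1 + (t.length : Int) - i], -1, i + 1 + (t.length : Int) + 1) from by
            simp [stepB, hy, hi]]
          rw [foldB_shift r' [i] [i + 1 + (t.length : Int) - i] (-1) (i + 1 + (t.length : Int) + 1)]
          rw [flushB_shift]
          have hYr : r'.foldl stepB ([], [], -1, i + 1 + (t.length : Int) + 1) =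
              (y :: r').foldl stepB ([], [], -1, i + (1 + (t.length : Int))) := by
            rw [List.foldl_cons]
            rw [show stepB ([], [], -1, i + (1 + (t.length : Int))) y = ([], [], -1, i + (1 + (t.length : Int)) + 1) from by
              simp [stepB, hy]]
            have : i + 1 + (t.length : Int) + 1 = i + (1 + (t.length : Int)) + 1 := by ring
            rw [this]
          rw [hYr]
          have hIH := ih (y :: r') hr (i + (1 + (t.length : Int))) (by omega)
          rw [hIH, hrw]
          simp only [h, if_pos]
          simp only [Prod.mk.injEq, List.singleton_append, List.cons.injEq]
          refine ⟨trivial, by ring, trivial⟩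
      · rw [show stepB ([], [], -1, i) x = ([], [], -1, i + 1) by simp [stepB, h]]
        rw [foldB_nonzeros t x htmem h (i + 1)]
        have : i + 1 + (t.length : Int) = i + (1 + (t.length : Int)) := by ring
        rw [this, ih r hr _ (by positivity)]
        simp only [h, Bool.false_eq_true, if_neg, not_false_iff, ite_false]

-- ===== VERDICT (by name: the statement is the Claim_ definition above) =====
theorem calibrate_pulsewidth_spec : Claim_equal_calibrate_pulsewidth := by
  intro pf _
  unfold Spec_calibrate_pulsewidth calibrate_pulsewidth calibrate_pulsewidth_alt
  have hA := foldA_runs pf.length pf le_rfl 0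
  have hB := foldB_runs pf.length pf le_rfl 0 le_rfl
  simp only [flushB] at hB
  simp only [hA, ← hB]
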